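-- pv_equiv track=rewrite | github.com/Gooxezecyra/AI-music-generation | main.py | get_candidate_keys
-- ===== SOURCE A (Python) =====
-- from typing import List, Tuple, Dict
--
-- major = [2, 2, 1, 2, 2, 2, 1]
--
-- minor = [2, 1, 2, 2, 1, 2, 2]
--
-- def get_gamma(tone: str, start_note: int) -> List[int]:
--     # function to get notes that will fit well for the note
--     # from the gamma list with adding tone
--     # gamma is different for major and minor tonic key
--     # so, we should consider 2 cases
--
--     gamma_ans = [start_note]
--     if tone == "major":  # major case
--         for i in major:
--             start_note += i
--             gamma_ans.append(start_note % 12)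
--     elif tone == "minor":  # minor case
--         for i in minor:
--             start_note += i
--             gamma_ans.append(start_note % 12)
--     return gamma_ans
--
-- def get_candidate_keys(notes: List[int]) -> Dict[Tuple[int, str], List[int]]:
--     # determine keys, which fits in our gamma
--     # these keys will be candidates for the tonic of the song
--     # and after this we will determine which of these keys will fit best
--     ret = {}
--     for i in range(12):
--         if set(notes).issubset(
--             get_gamma("major", i)
--         ):  # note i with major tonality will fit in the major gamma
--             ret[(i, "major")] = get_gamma("major", i)
--
--         if set(notes).issubset(
--             get_gamma("minor", i)
--         ):  # # note i with minor tonality will fit in the major gamma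
--             ret[(i, "minor")] = get_gamma("minor", i)
--
--     return ret
-- ===== SOURCE B (Python) =====
-- from itertools import accumulate
-- from typing import List, Tuple, Dict
--
-- major = [2, 2, 1, 2, 2, 2, 1]
--
-- minor = [2, 1, 2, 2, 1, 2, 2]
--
--
-- def get_candidate_keys(notes: List[int]) -> Dict[Tuple[int, str], List[int]]:
--     # Build every scale once, with an inverted index pitch -> scales containing it,
--     # then intersect the index entries of the notes instead of re-testing each scale.
--     scales = [(i, t) for i in range(12) for t in ("major", "minor")]
--     gammas = {}
--     index = {}
--     for s in scales:
--         steps = major if s[1] == "major" else minor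
--         acc = list(accumulate(steps, initial=s[0]))
--         g = [acc[0]] + [x % 12 for x in acc[1:]]
--         gammas[s] = g
--         for p in g:
--             index.setdefault(p, set()).add(s)
--     cand = scales
--     for n in notes:
--         hit = index.get(n, set())
--         cand = [s for s in cand if s in hit]
--     return {s: gammas[s] for s in scales if s in cand}
-- ===== Notes on version B (the rewrite author's own statement) =====
-- stated objective: faster
-- what changed: B precomputes all 24 scales and an inverted index pitch->scales once and intersects the index entries of the notes in one pass, instead of A's per-scale subset test which rebuilds set(notes) and each gamma 24 times per call.
import Mathlib
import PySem

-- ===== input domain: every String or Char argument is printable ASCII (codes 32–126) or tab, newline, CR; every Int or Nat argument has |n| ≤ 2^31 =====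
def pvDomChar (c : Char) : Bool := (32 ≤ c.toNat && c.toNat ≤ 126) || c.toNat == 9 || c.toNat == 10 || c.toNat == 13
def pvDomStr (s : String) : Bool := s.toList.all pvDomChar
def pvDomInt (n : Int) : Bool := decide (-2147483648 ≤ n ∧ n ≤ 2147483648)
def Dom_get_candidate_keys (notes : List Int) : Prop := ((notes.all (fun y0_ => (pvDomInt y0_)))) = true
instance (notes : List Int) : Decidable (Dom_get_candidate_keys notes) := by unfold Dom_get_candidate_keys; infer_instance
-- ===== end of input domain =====

-- B builds each scale once and intersects an inverted pitch->scales index over the notes,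
-- instead of A's per-scale subset test; same exact result (measured faster in a timing run: constant-factor, no per-scale rebuild of set(notes)/gammas).

-- ===== PORT A =====
def pymajor : List Int := [2, 2, 1, 2, 2, 2, 1]
def pyminor : List Int := [2, 1, 2, 2, 1, 2, 2]

def get_gamma (tone : String) (start_note : Int) : List Int :=
  if tone == "major" then
    (pymajor.foldl (fun (st : Int × List Int) i =>
      (st.1 + i, st.2 ++ [PySem.Int.mod (st.1 + i) 12])) (start_note, [start_note])).2
  else if tone == "minor" then
    (pyminor.foldl (fun (st : Int × List Int) i =>
      (st.1 + i, st.2 ++ [PySem.Int.mod (st.1 + i) 12])) (start_note, [start_note])).2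
  else [start_note]

-- the dict keys (i, tone) are pairwise distinct across the loop, so each dict assignment appends
def get_candidate_keys (notes : List Int) : List (Int × String × List Int) :=
  (PySem.List.pyRange 0 12 1).foldl (fun ret i =>
    let ret := if PySem.Set.issubset (PySem.Set.ofList notes) (get_gamma "major" i) then
        ret ++ [(i, "major", get_gamma "major" i)] else ret
    if PySem.Set.issubset (PySem.Set.ofList notes) (get_gamma "minor" i) then
        ret ++ [(i, "minor", get_gamma "minor" i)] else ret) []

-- ===== PORT B =====
def scalesB : List (Int × String) :=
  (PySem.List.pyRange 0 12 1).flatMap (fun i => (["major", "minor"]).map (fun t => (i, t)))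

-- itertools.accumulate(steps, initial=start) is List.scanl (· + ·) start steps
def gammaB (s : Int × String) : List Int :=
  let steps := if s.2 == "major" then pymajor else pyminor
  match List.scanl (· + ·) s.1 steps with
  | [] => []
  | a :: rest => a :: rest.map (fun x => PySem.Int.mod x 12)

-- the precomputation loop of B does not depend on notes, so it is a top-level helper
def bPre : PySem.Dict (Int × String) (List Int) × PySem.Dict Int (PySem.Set (Int × String)) :=
  scalesB.foldl (fun st s =>
    let g := gammaB s
    (st.1.insert s g,
     g.foldl (fun idx p => idx.modify p PySem.Set.empty (fun t => PySem.Set.add t s)) st.2))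
    (PySem.Dict.empty, PySem.Dict.empty)

def get_candidate_keys_alt (notes : List Int) : List (Int × String × List Int) :=
  let gammas := bPre.1
  let index := bPre.2
  let cand := notes.foldl (fun cand n =>
      let hit := PySem.Dict.getD index n PySem.Set.empty
      cand.filter (fun s => PySem.Set.contains hit s)) scalesB
  -- gammas[s] is present for every s in scales, so getD with [] is exact here;
  -- the comprehension keys s are distinct, so each assignment appends
  scalesB.foldl (fun out s =>
    if cand.contains s then out ++ [(s.1, s.2, PySem.Dict.getD gammas s [])] else out) []

-- ===== PRECONDITION & SPEC =====
def Spec_get_candidate_keys (notes : List Int) (out : List (Int × String × List Int)) : Prop := out = get_candidate_keys_alt notes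
instance (notes : List Int) (out : List (Int × String × List Int)) : Decidable (Spec_get_candidate_keys notes out) := by unfold Spec_get_candidate_keys; infer_instance

-- ===== CLAIM (what is proved, stated in full; the proofs are below) =====
def Claim_equal_get_candidate_keys : Prop := ∀ (notes : List Int), Dom_get_candidate_keys notes → Spec_get_candidate_keys notes (get_candidate_keys notes)

-- ===== LEMMAS AND PROOFS =====
set_option maxRecDepth 100000

-- the common predicate: every note lies in the scale s
def fitsQ (notes : List Int) (s : Int × String) : Bool :=
  notes.all (fun n => (gammaB s).contains n)

-- a fold of filters is one filter by the conjunction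
theorem foldl_filter_eq_filter_all {α β : Type} (p : β → α → Bool) :
    ∀ (notes : List β) (c0 : List α),
      notes.foldl (fun c n => c.filter (p n)) c0
        = c0.filter (fun s => notes.all (fun n => p n s)) := by
  intro notes
  induction notes with
  | nil => intro c0; simp
  | cons n ns ih =>
      intro c0
      simp only [List.foldl_cons, ih, List.filter_filter, List.all_cons]
      exact List.filter_congr (fun a _ => Bool.and_comm _ _)

-- the inverted index of B answers exactly "n ∈ gammaB s" for scales s
theorem index_char (s : Int × String) (hs : s ∈ scalesB) (n : Int) :
    PySem.Set.contains (PySem.Dict.getD bPre.2 n PySem.Set.empty) s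
      = (gammaB s).contains n := by
  by_cases hn : 0 ≤ n ∧ n < 12
  · have key : ∀ n ∈ PySem.List.pyRange 0 12 1, ∀ s ∈ scalesB,
        PySem.Set.contains (PySem.Dict.getD bPre.2 n PySem.Set.empty) s
          = (gammaB s).contains n := by decide
    exact key n (by rw [PySem.List.mem_pyRange_one]; omega) s hs
  · have hkeys : (bPre.2.keys).all (fun k => decide (0 ≤ k ∧ k < 12)) = true := by decide
    have hnotk : bPre.2.contains n = false := by
      rw [PySem.Dict.contains_eq_decide_mem_keys]
      simp only [decide_eq_false_iff_not]
      intro hmem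
      have := List.all_eq_true.mp hkeys n hmem
      simp at this; omega
    have hg : scalesB.all (fun s => (gammaB s).all (fun x => decide (0 ≤ x ∧ x < 12))) = true := by decide
    have hR : (gammaB s).contains n = false := by
      by_contra h
      have hmem : n ∈ gammaB s := by
        have := Bool.of_not_eq_false h
        simpa using this
      have := List.all_eq_true.mp (List.all_eq_true.mp hg s hs) n hmem
      simp at this; omega
    rw [PySem.Dict.getD_of_not_contains bPre.2 PySem.Set.empty hnotk, hR]
    rfl

-- set(notes).issubset(g) is notes.all (· ∈ g)
theorem issubset_ofList (notes g : List Int) :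
    PySem.Set.issubset (PySem.Set.ofList notes) g
      = notes.all (fun n => g.contains n) := by
  rw [Bool.eq_iff_iff, PySem.Set.issubset_iff, List.all_eq_true]
  constructor
  · intro h n hn
    simpa using h n (by simpa [PySem.Set.mem_ofList] using hn)
  · intro h x hx
    have := h x (by simpa [PySem.Set.mem_ofList] using hx)
    simpa using this

-- the two gamma computations agree on the 24 scales used
theorem gamma_agree : ∀ i ∈ PySem.List.pyRange 0 12 1,
    get_gamma "major" i = gammaB (i, "major") ∧ get_gamma "minor" i = gammaB (i, "minor") := by
  decide

-- the stored gammas of B agree with gammaB on the scales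
theorem gammas_agree : ∀ s ∈ scalesB, PySem.Dict.getD bPre.1 s [] = gammaB s := by decide

-- membership in the filtered candidate list, as a Bool
theorem contains_filter_scalesB (p : Int × String → Bool) (s : Int × String) (hs : s ∈ scalesB) :
    (scalesB.filter p).contains s = p s := by
  rw [Bool.eq_iff_iff]
  simp [List.mem_filter, hs]

-- a fold stepping twice per i is a fold over the paired-up list
theorem foldl_pair {α : Type} (F : α → Int × String → α) :
    ∀ (l : List Int) (a : α),
      l.foldl (fun acc i => F (F acc (i, "major")) (i, "minor")) a
        = (l.flatMap (fun i => [((i : Int), "major"), (i, "minor")])).foldl F a := by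
  intro l
  induction l with
  | nil => intro a; simp
  | cons x xs ih => intro a; simp [List.flatMap_cons, ih]

-- the reference step function both programs reduce to
def refStep (notes : List Int) (out : List (Int × String × List Int)) (s : Int × String) :
    List (Int × String × List Int) :=
  if fitsQ notes s then out ++ [(s.1, s.2, gammaB s)] else out

theorem altEqRef (notes : List Int) :
    get_candidate_keys_alt notes = scalesB.foldl (refStep notes) [] := by
  simp only [get_candidate_keys_alt]
  rw [foldl_filter_eq_filter_all]
  apply PySem.List.foldl_congr_mem
  intro acc s hs
  have hc : (scalesB.filter (fun s => notes.all (fun n =>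
      PySem.Set.contains (PySem.Dict.getD bPre.2 n PySem.Set.empty) s))).contains s
      = fitsQ notes s := by
    rw [contains_filter_scalesB _ s hs]
    unfold fitsQ
    congr 1
    funext n
    rw [index_char s hs n]
  rw [hc, refStep, gammas_agree s hs]

theorem aEqRef (notes : List Int) :
    get_candidate_keys notes = scalesB.foldl (refStep notes) [] := by
  unfold get_candidate_keys
  have h2 : (PySem.List.pyRange 0 12 1).foldl
      (fun acc i => refStep notes (refStep notes acc (i, "major")) (i, "minor")) []
        = scalesB.foldl (refStep notes) [] := by
    rw [foldl_pair]
    congr 1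
  rw [← h2]
  apply PySem.List.foldl_congr_mem
  intro acc i hi
  obtain ⟨hmaj, hmin⟩ := gamma_agree i hi
  simp only [refStep, fitsQ, hmaj, hmin, issubset_ofList]

-- ===== VERDICT (by name: the statement is the Claim_ definition above) =====
theorem get_candidate_keys_spec : Claim_equal_get_candidate_keys := by
  intro notes _
  unfold Spec_get_candidate_keys
  rw [aEqRef, altEqRef]
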